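-- pv_equiv track=rewrite | github.com/felipesantoos/smell-detector | smell_detector/absence_background.py | absence_counter
-- ===== SOURCE A (Python) =====
-- def absence_counter(steps_scenarios_feature):
--     # Using the biggest scenario to increment
--     biggest_scenario = max(steps_scenarios_feature, key=len, default=[])
--
--     # Going through the list by largest size and reducing loops
--     step_counts = {}
--     for size in range(len(biggest_scenario), 0, -1):
--         # Counting occurrences
--         step_counts.clear()
--         for steps_scenario in steps_scenarios_feature:
--             key = tuple(steps_scenario[:size])
--             if key in step_counts:
--                 step_counts[key] += 1
--             else:
--                 step_counts[key] = 1
--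
--         # Checking if step_counts meets criteria
--         if max(step_counts.values(), default=0) >= len(steps_scenarios_feature):
--             return step_counts
--
--     return step_counts
-- ===== SOURCE B (Python) =====
-- def absence_counter(steps_scenarios_feature):
--     # One elementwise pass computing the longest common prefix, instead of
--     # rebuilding a count dict for every candidate size.
--     if not steps_scenarios_feature or max(len(s) for s in steps_scenarios_feature) == 0:
--         return {}
--     n = len(steps_scenarios_feature)
--     first = steps_scenarios_feature[0]
--     m = min(len(s) for s in steps_scenarios_feature)
--     k = 0
--     while k < m and all(s[k] == first[k] for s in steps_scenarios_feature):
--         k += 1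
--     if k > 0:
--         return {tuple(first[:k]): n}
--     # no common first element: size-1 count dict, as the caller expects
--     counts = {}
--     for s in steps_scenarios_feature:
--         key = tuple(s[:1])
--         counts[key] = counts.get(key, 0) + 1
--     return counts
-- ===== Notes on version B (the rewrite author's own statement) =====
-- stated objective: faster
-- what changed: Instead of rebuilding and scanning a count dict for every candidate prefix size from the longest down, B computes the longest common prefix in one elementwise pass and returns {prefix: N} directly, falling back to the size-1 count dict only when there is no common first element.
import Mathlib
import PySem

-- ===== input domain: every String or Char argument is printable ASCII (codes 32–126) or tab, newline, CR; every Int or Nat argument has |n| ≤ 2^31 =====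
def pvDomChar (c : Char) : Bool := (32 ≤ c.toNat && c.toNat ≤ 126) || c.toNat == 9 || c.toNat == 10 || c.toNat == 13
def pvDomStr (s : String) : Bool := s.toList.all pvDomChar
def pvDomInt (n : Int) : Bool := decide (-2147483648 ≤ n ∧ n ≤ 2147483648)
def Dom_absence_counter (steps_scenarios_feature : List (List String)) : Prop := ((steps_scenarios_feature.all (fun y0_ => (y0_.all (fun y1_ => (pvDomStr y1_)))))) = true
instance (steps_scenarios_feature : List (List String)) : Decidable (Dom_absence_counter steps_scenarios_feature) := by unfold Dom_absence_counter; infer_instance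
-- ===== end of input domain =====

-- B replaces A's per-size dict rebuild (largest size downwards) by one elementwise
-- longest-common-prefix pass; objective: faster (O(L*N) instead of O(L^2*N)).

-- ===== PORT A =====
-- inner counting loop: step_counts.clear(); for steps_scenario in ...: count tuple(steps_scenario[:size])
def pvBuildA (scs : List (List String)) (size : Int) : PySem.Dict (List String) Int :=
  scs.foldl (fun d sc =>
    let key := PySem.List.slice sc none (some size)
    if d.contains key then d.insert key (d.getD key 0 + 1) else d.insert key 1)
    PySem.Dict.empty

-- for size in range(len(biggest_scenario), 0, -1): … early return when the max count reaches len(scs)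
def pvLoopA (scs : List (List String)) : List Int → PySem.Dict (List String) Int → PySem.Dict (List String) Int
  | [], cur => cur
  | size :: rest, _cur =>
      let counts := pvBuildA scs size
      if (scs.length : Int) ≤ PySem.List.maxD counts.values (fun v => v) 0 then counts
      else pvLoopA scs rest counts

def absence_counter (steps_scenarios_feature : List (List String)) : List (List String × Int) :=
  let biggest := PySem.List.maxD steps_scenarios_feature (fun s => (s.length : Int)) []
  (pvLoopA steps_scenarios_feature
    (PySem.List.pyRange (biggest.length : Int) 0 (-1)) PySem.Dict.empty).items

-- ===== PORT B =====
-- all(s[k] == first[k] for s in scs); s[k] is in range whenever k < min length, so getD is exact there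
def pvColEq (scs : List (List String)) (first : List String) (k : Nat) : Bool :=
  scs.all (fun s => s.getD k "" == first.getD k "")

-- while k < m and all(...): k += 1
def pvScanB (scs : List (List String)) (first : List String) (m k : Nat) : Nat :=
  if k < m then
    if pvColEq scs first k then pvScanB scs first m (k + 1) else k
  else k
termination_by m - k

def absence_counter_alt (steps_scenarios_feature : List (List String)) : List (List String × Int) :=
  if steps_scenarios_feature = []
     ∨ PySem.List.maxD (steps_scenarios_feature.map (fun s => (s.length : Int))) (fun v => v) 0 = 0
  then []
  else
    let n : Int := steps_scenarios_feature.length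
    let first := steps_scenarios_feature.headD []
    let m := (PySem.List.minD (steps_scenarios_feature.map (fun s => (s.length : Int)))
                (fun v => v) 0).toNat
    let k := pvScanB steps_scenarios_feature first m 0
    if 0 < k then [(first.take k, n)]
    else (steps_scenarios_feature.foldl (fun d sc =>
            let key := sc.take 1
            d.insert key (d.getD key 0 + 1)) PySem.Dict.empty).items

-- ===== PRECONDITION & SPEC =====
def Spec_absence_counter (steps_scenarios_feature : List (List String)) (out : List (List String × Int)) : Prop := out = absence_counter_alt steps_scenarios_feature
instance (steps_scenarios_feature : List (List String)) (out : List (List String × Int)) : Decidable (Spec_absence_counter steps_scenarios_feature out) := by unfold Spec_absence_counter; infer_instance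

-- ===== CLAIM (what is proved, stated in full; the proofs are below) =====
def Claim_equal_absence_counter : Prop := ∀ (steps_scenarios_feature : List (List String)), Dom_absence_counter steps_scenarios_feature → Spec_absence_counter steps_scenarios_feature (absence_counter steps_scenarios_feature)

-- ===== LEMMAS AND PROOFS =====

-- (scan) pvScanB returns a point q with: j <= q <= m, all columns in [j,q) equal, and a mismatch at q if q < m
lemma pvScanB_spec (scs : List (List String)) (first : List String) (m : Nat) :
    ∀ t j, m - j = t → j ≤ m →
      j ≤ pvScanB scs first m j ∧ pvScanB scs first m j ≤ m ∧
      (∀ i, j ≤ i → i < pvScanB scs first m j → pvColEq scs first i = true) ∧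
      (pvScanB scs first m j < m → pvColEq scs first (pvScanB scs first m j) = false) := by
  intro t
  induction t with
  | zero =>
    intro j ht hj
    have hjm : j = m := by omega
    subst hjm
    rw [pvScanB, if_neg (lt_irrefl j)]
    exact ⟨le_refl _, le_refl _, fun i h1 h2 => by omega, fun h => absurd h (lt_irrefl j)⟩
  | succ t ih =>
    intro j ht hj
    have hjlt : j < m := by omega
    rw [pvScanB, if_pos hjlt]
    by_cases hc : pvColEq scs first j = true
    · rw [if_pos hc]
      obtain ⟨h1, h2, h3, h4⟩ := ih (j + 1) (by omega) (by omega)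
      refine ⟨by omega, h2, ?_, h4⟩
      intro i hji hi
      by_cases hij : i = j
      · rw [hij]; exact hc
      · exact h3 i (by omega) hi
    · rw [if_neg hc]
      exact ⟨le_refl j, by omega, by omega, fun _ => by simpa using hc⟩

-- equal columns below σ give equal takes
lemma take_eq_of_colEq (sc first : List String) (σ : Nat)
    (h1 : σ ≤ sc.length) (h2 : σ ≤ first.length)
    (hc : ∀ i < σ, sc.getD i "" = first.getD i "") :
    sc.take σ = first.take σ := by
  apply List.ext_getElem
  · simp; omega
  · intro i hi hi'
    have hilt : i < σ := by simp at hi; omega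
    have := hc i hilt
    rw [List.getD_eq_getElem sc "" (by omega), List.getD_eq_getElem first "" (by omega)] at this
    simpa [List.getElem_take] using this

-- a column mismatch at q < σ gives different takes
lemma take_ne_of_col_ne (sc first : List String) (σ q : Nat)
    (hq : q < σ) (h1 : q < sc.length) (h2 : q < first.length)
    (hne : sc.getD q "" ≠ first.getD q "") :
    sc.take σ ≠ first.take σ := by
  intro h
  apply hne
  have := congrArg (fun l => l.getD q "") h
  simp only at this
  rw [List.getD_eq_getElem (sc.take σ) "" (by simp; omega),
      List.getD_eq_getElem (first.take σ) "" (by simp; omega)] at this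
  rw [List.getD_eq_getElem sc "" h1, List.getD_eq_getElem first "" h2]
  simpa [List.getElem_take] using this

-- A's counting branch is an insert-with-default, folded over the sliced keys
lemma pvBuildA_eq_insertfold (scs : List (List String)) (size : Int) :
    pvBuildA scs size =
      (scs.map (fun sc => PySem.List.slice sc none (some size))).foldl
        (fun d x => d.insert x (d.getD x 0 + 1)) PySem.Dict.empty := by
  rw [List.foldl_map]
  unfold pvBuildA
  congr 1
  funext d sc
  show (if d.contains (PySem.List.slice sc none (some size)) = true
        then d.insert _ (d.getD _ 0 + 1) else d.insert _ 1) = _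
  by_cases hc : d.contains (PySem.List.slice sc none (some size)) = true
  · simp only [hc, if_true]
  · rw [PySem.Dict.getD_of_not_contains _ _ (by simpa using hc)]
    simp [hc]

lemma foldl_insert_replicate (K : List String) :
    ∀ (k : Nat) (c : Int),
      (List.replicate k K).foldl (fun d x => d.insert x (d.getD x 0 + 1))
          (PySem.Dict.mk [(K, c)]) = PySem.Dict.mk [(K, c + k)] := by
  intro k
  induction k with
  | zero => intro c; simp
  | succ k ih =>
    intro c
    rw [List.replicate_succ, List.foldl_cons]
    have hins : (PySem.Dict.mk [(K, c)]).insert K ((PySem.Dict.mk [(K, c)]).getD K 0 + 1) =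
        PySem.Dict.mk [(K, c + 1)] := by
      simp [PySem.Dict.insert, PySem.Dict.getD, PySem.Dict.get?, PySem.Dict.contains]
    rw [hins, ih]
    push_cast
    ring_nf

-- when every scenario has the same take, the count dict is the singleton {key: N}
lemma pvBuildA_all_eq (scs : List (List String)) (hne : scs ≠ []) (σ : Nat) (K : List String)
    (hK : ∀ sc ∈ scs, sc.take σ = K) :
    pvBuildA scs (σ : Int) = PySem.Dict.mk [(K, (scs.length : Int))] := by
  rw [pvBuildA_eq_insertfold]
  have hmem : ∀ b ∈ scs.map (fun sc => PySem.List.slice sc none (some (σ : Int))), b = K := by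
    intro b hb
    simp only [List.mem_map] at hb
    obtain ⟨sc, hsc, rfl⟩ := hb
    rw [PySem.List.slice_to_natCast]
    exact hK sc hsc
  have hmap : scs.map (fun sc => PySem.List.slice sc none (some (σ : Int))) =
      List.replicate scs.length K := by
    have := List.eq_replicate_of_mem hmem
    simpa using this
  rw [hmap]
  obtain ⟨k', hk'⟩ : ∃ k', scs.length = k' + 1 := by
    cases scs with | nil => simp_all | cons a t => exact ⟨t.length, rfl⟩
  rw [hk', List.replicate_succ, List.foldl_cons]
  have hins : PySem.Dict.empty.insert K (PySem.Dict.empty.getD K (0 : Int) + 1) =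
      PySem.Dict.mk [(K, (1 : Int))] := by
    simp [PySem.Dict.insert, PySem.Dict.getD, PySem.Dict.get?, PySem.Dict.contains,
      PySem.Dict.empty]
  rw [hins, foldl_insert_replicate]
  push_cast
  ring_nf

-- when some scenario's take differs from the first's, every count is < N, so the max check fails
lemma pvBuildA_max_lt (scs : List (List String)) (hne : scs ≠ []) (σ : Nat)
    (hdiff : ∃ sc ∈ scs, sc.take σ ≠ (scs.headD []).take σ) :
    PySem.List.maxD (pvBuildA scs (σ : Int)).values (fun v => v) 0 < (scs.length : Int) := by
  obtain ⟨sc0, hsc0, hne0⟩ := hdiff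
  have hfirst : scs.headD [] ∈ scs := by cases scs with | nil => simp_all | cons a t => simp
  have hvals : ∀ v ∈ (pvBuildA scs (σ : Int)).values, v < (scs.length : Int) := by
    intro v hv
    rw [pvBuildA_eq_insertfold, PySem.Dict.foldl_insert_getD_add_one_eq_counter] at hv
    set keys := scs.map (fun sc => PySem.List.slice sc none (some (σ : Int))) with hkeys
    have : v ∈ (PySem.Dict.counter keys).items.map (·.2) := hv
    rw [PySem.Dict.items_counter] at this
    simp only [List.map_map, List.mem_map] at this
    obtain ⟨k, hk, rfl⟩ := this
    simp only [Function.comp]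
    have hcle : keys.count k ≤ keys.length := List.count_le_length
    have hcnt : keys.count k ≠ keys.length := by
      intro hceq
      have hall := (List.count_eq_length).mp hceq
      have e1 : k = PySem.List.slice sc0 none (some (σ : Int)) :=
        hall _ (List.mem_map_of_mem hsc0)
      have e2 : k = PySem.List.slice (scs.headD []) none (some (σ : Int)) :=
        hall _ (List.mem_map_of_mem hfirst)
      rw [PySem.List.slice_to_natCast] at e1 e2
      exact hne0 (e1 ▸ e2 ▸ rfl)
    have hlen : keys.length = scs.length := by simp [hkeys]
    have : keys.count k < scs.length := by omega
    exact_mod_cast this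
  have hpos : 0 < scs.length := by cases scs <;> simp_all
  show (PySem.List.max? (pvBuildA scs (σ : Int)).values (fun v => v)).getD 0 < _
  cases hm : PySem.List.max? (pvBuildA scs (σ : Int)).values (fun v => v) with
  | none => simp only [Option.getD_none]; exact_mod_cast hpos
  | some v => simpa using hvals v (PySem.List.max?_mem hm)

-- main loop lemma
lemma pvLoopA_spec (scs : List (List String)) (hne : scs ≠ [])
    (m L q : Nat)
    (hmle : ∀ sc ∈ scs, m ≤ sc.length)
    (hLge : ∀ sc ∈ scs, sc.length ≤ L)
    (hmmem : ∃ sc ∈ scs, sc.length = m)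
    (hLmem : ∃ sc ∈ scs, sc.length = L)
    (hqm : q ≤ m)
    (hcol : ∀ i < q, pvColEq scs (scs.headD []) i = true)
    (hstop : q < m → pvColEq scs (scs.headD []) q = false) :
    ∀ (a : Nat), q ≤ a → a ≤ L → ∀ cur,
      pvLoopA scs (PySem.List.pyRange (a : Int) 0 (-1)) cur =
        if 1 ≤ q then PySem.Dict.mk [((scs.headD []).take q, (scs.length : Int))]
        else if 1 ≤ a then pvBuildA scs ((1 : Nat) : Int) else cur := by
  have hfirst : scs.headD [] ∈ scs := by cases scs with | nil => simp_all | cons a t => simp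
  -- all takes at σ ≤ q are equal to the first's
  have hallEq : ∀ σ ≤ q, ∀ sc ∈ scs, sc.take σ = (scs.headD []).take σ := by
    intro σ hσ sc hsc
    apply take_eq_of_colEq sc _ σ (by have := hmle sc hsc; omega)
      (by have := hmle _ hfirst; omega)
    intro i hi
    have := hcol i (by omega)
    simp only [pvColEq, List.all_eq_true] at this
    simpa using this sc hsc
  -- some take differs at every q < σ ≤ L
  have hdiff : ∀ σ, q < σ → σ ≤ L → ∃ sc ∈ scs, sc.take σ ≠ (scs.headD []).take σ := by
    intro σ hσq hσL
    by_cases hσm : σ ≤ m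
    · have hc := hstop (by omega)
      rw [pvColEq, List.all_eq_false] at hc
      obtain ⟨sc, hsc, hscne⟩ := hc
      refine ⟨sc, hsc, take_ne_of_col_ne sc _ σ q hσq
        (by have := hmle sc hsc; omega) (by have := hmle _ hfirst; omega) (by simpa using hscne)⟩
    · obtain ⟨scm, hscm, hscml⟩ := hmmem
      obtain ⟨scL, hscL, hscLl⟩ := hLmem
      by_cases hf : σ ≤ (scs.headD []).length
      · refine ⟨scm, hscm, fun h => ?_⟩
        have := congrArg List.length h
        simp only [List.length_take] at this
        omega
      · refine ⟨scL, hscL, fun h => ?_⟩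
        have := congrArg List.length h
        simp only [List.length_take] at this
        have := hmle _ hfirst
        omega
  intro a
  induction a with
  | zero =>
    intro hqa _ cur
    have hq0 : q = 0 := by omega
    rw [PySem.List.pyRange_neg_one_eq_nil (by norm_num)]
    simp [pvLoopA, hq0]
  | succ a ih =>
    intro hqa haL cur
    rw [PySem.List.pyRange_neg_one_cons (by positivity)]
    show pvLoopA scs (((a : Int) + 1) :: _) cur = _
    by_cases hq : q = a + 1
    · -- all takes of size a+1 agree: singleton dict, loop returns
      have hall : ∀ sc ∈ scs, sc.take (a + 1) = (scs.headD []).take (a + 1) :=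
        fun sc h => hallEq (a + 1) (by omega) sc h
      have hb : pvBuildA scs ((a + 1 : Nat) : Int) =
          PySem.Dict.mk [((scs.headD []).take (a + 1), (scs.length : Int))] :=
        pvBuildA_all_eq scs hne (a + 1) _ hall
      rw [pvLoopA]
      have hcast : ((a : Int) + 1) = ((a + 1 : Nat) : Int) := by push_cast; ring
      rw [hcast, hb]
      have hcond : (scs.length : Int) ≤
          PySem.List.maxD (PySem.Dict.mk [((scs.headD []).take (a + 1), (scs.length : Int))]).values
            (fun v => v) 0 := by
        show (scs.length : Int) ≤ (PySem.List.max? [((scs.length : Int))] (fun v => v)).getD 0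
        rw [PySem.List.max?_id_cons]
        simp
      rw [if_pos hcond, if_pos (by omega), hq]
    · -- a+1 > q: the max check fails, loop continues
      have hd := hdiff (a + 1) (by omega) haL
      have hlt := pvBuildA_max_lt scs hne (a + 1) hd
      rw [pvLoopA]
      have hcast : ((a : Int) + 1) = ((a + 1 : Nat) : Int) := by push_cast; ring
      rw [hcast, if_neg (by omega)]
      have hstep : ((a + 1 : Nat) : Int) - 1 = ((a : Nat) : Int) := by push_cast; ring
      rw [hstep, ih (by omega) (by omega) _]
      by_cases hq1 : 1 ≤ q
      · rw [if_pos hq1, if_pos hq1]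
      · rw [if_neg hq1, if_neg hq1]
        by_cases ha1 : 1 ≤ a
        · rw [if_pos ha1, if_pos (by omega)]
        · rw [if_neg ha1, if_pos (by omega)]
          have : a = 0 := by omega
          subst this
          norm_num

-- final assembly
lemma main_eq (scs : List (List String)) : absence_counter scs = absence_counter_alt scs := by
  by_cases hne : scs = []
  · subst hne; decide
  · -- the biggest scenario and its length L
    obtain ⟨b, hb⟩ : ∃ b, PySem.List.max? scs (fun s => (s.length : Int)) = some b := by
      cases h : PySem.List.max? scs (fun s => (s.length : Int)) with
      | none => exact absurd ((PySem.List.max?_eq_none_iff _ _).mp h) hne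
      | some b => exact ⟨b, rfl⟩
    have hbmem : b ∈ scs := PySem.List.max?_mem hb
    have hbmax : ∀ y ∈ scs, y.length ≤ b.length := by
      intro y hy
      exact_mod_cast PySem.List.max?_isMax hb y hy
    have hmaxD : PySem.List.maxD scs (fun s => (s.length : Int)) [] = b := by
      show (PySem.List.max? scs (fun s => (s.length : Int))).getD [] = b
      rw [hb]; rfl
    -- the max over the mapped lengths equals L
    obtain ⟨v, hv⟩ : ∃ v, PySem.List.max? (scs.map (fun s => (s.length : Int))) (fun w => w) = some v := by
      cases h : PySem.List.max? (scs.map (fun s => (s.length : Int))) (fun w => w) with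
      | none =>
        have := (PySem.List.max?_eq_none_iff _ _).mp h
        simp only [List.map_eq_nil_iff] at this
        exact absurd this hne
      | some v => exact ⟨v, rfl⟩
    have hvmem : v ∈ scs.map (fun s => (s.length : Int)) := PySem.List.max?_mem hv
    have hvmax : ∀ w ∈ scs.map (fun s => (s.length : Int)), w ≤ v := PySem.List.max?_isMax hv
    have hvL : v = (b.length : Int) := by
      obtain ⟨sc, hsc, rfl⟩ := List.mem_map.mp hvmem
      have h1 : sc.length ≤ b.length := hbmax sc hsc
      have h2 : (b.length : Int) ≤ (sc.length : Int) :=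
        hvmax _ (List.mem_map_of_mem hbmem)
      omega
    have hLImaxD : PySem.List.maxD (scs.map (fun s => (s.length : Int))) (fun w => w) 0 =
        (b.length : Int) := by
      show (PySem.List.max? (scs.map (fun s => (s.length : Int))) (fun w => w)).getD 0 = _
      rw [hv]; exact hvL
    show (pvLoopA scs
        (PySem.List.pyRange
          (((PySem.List.maxD scs (fun s => (s.length : Int)) []).length : Int)) 0 (-1))
        PySem.Dict.empty).items = absence_counter_alt scs
    rw [hmaxD]
    by_cases hL0 : b.length = 0
    · -- every scenario is empty: A's loop never runs, B takes its early exit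
      rw [hL0, PySem.List.pyRange_neg_one_eq_nil (by norm_num)]
      unfold absence_counter_alt
      rw [if_pos (Or.inr (by rw [hLImaxD, hL0]; rfl))]
      rfl
    · -- the min over the mapped lengths
      obtain ⟨mv, hmv⟩ : ∃ mv, PySem.List.min? (scs.map (fun s => (s.length : Int))) (fun w => w) = some mv := by
        cases h : PySem.List.min? (scs.map (fun s => (s.length : Int))) (fun w => w) with
        | none =>
          have := (PySem.List.min?_eq_none_iff _ _).mp h
          simp only [List.map_eq_nil_iff] at this
          exact absurd this hne
        | some mv => exact ⟨mv, rfl⟩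
      obtain ⟨scm, hscm, hscml⟩ := List.mem_map.mp (PySem.List.min?_mem hmv)
      have hmvmin : ∀ w ∈ scs.map (fun s => (s.length : Int)), mv ≤ w := PySem.List.min?_isMin hmv
      have hminD : PySem.List.minD (scs.map (fun s => (s.length : Int))) (fun w => w) 0 = mv := by
        show (PySem.List.min? (scs.map (fun s => (s.length : Int))) (fun w => w)).getD 0 = mv
        rw [hmv]; rfl
      have hmv0 : 0 ≤ mv := by omega
      have hmle : ∀ sc ∈ scs, mv.toNat ≤ sc.length := by
        intro sc hsc
        have := hmvmin _ (List.mem_map_of_mem hsc)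
        omega
      have hmmem : ∃ sc ∈ scs, sc.length = mv.toNat := ⟨scm, hscm, by omega⟩
      have hmL : mv.toNat ≤ b.length := by
        have := hmvmin _ (List.mem_map_of_mem hbmem)
        omega
      -- the scan point q
      obtain ⟨hq0, hqm, hcol, hstop⟩ :=
        pvScanB_spec scs (scs.headD []) mv.toNat (mv.toNat - 0) 0 rfl (by omega)
      have hloop := pvLoopA_spec scs hne mv.toNat b.length
        (pvScanB scs (scs.headD []) mv.toNat 0) hmle hbmax hmmem ⟨b, hbmem, rfl⟩ hqm
        (fun i hi => hcol i (by omega) hi) hstop b.length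
        (by omega) (le_refl _) PySem.Dict.empty
      rw [hloop]
      unfold absence_counter_alt
      have hcond : ¬(scs = [] ∨
          PySem.List.maxD (scs.map (fun s => (s.length : Int))) (fun v => v) 0 = 0) := by
        rintro (h | h)
        · exact hne h
        · rw [hLImaxD] at h; omega
      rw [if_neg hcond]
      show _ = (if 0 < pvScanB scs (scs.headD [])
            ((PySem.List.minD (scs.map (fun s => (s.length : Int))) (fun w => w) 0).toNat) 0
          then [((scs.headD []).take (pvScanB scs (scs.headD [])
            ((PySem.List.minD (scs.map (fun s => (s.length : Int))) (fun w => w) 0).toNat) 0),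
            (scs.length : Int))]
          else (scs.foldl (fun d sc =>
            d.insert (sc.take 1) (d.getD (sc.take 1) 0 + 1)) PySem.Dict.empty).items)
      rw [hminD]
      by_cases hq : 1 ≤ pvScanB scs (scs.headD []) mv.toNat 0
      · have h2 : 0 < pvScanB scs (scs.headD []) mv.toNat 0 := by omega
        rw [if_pos hq, if_pos h2]
      · have h2 : ¬ 0 < pvScanB scs (scs.headD []) mv.toNat 0 := by omega
        have h3 : 1 ≤ b.length := by omega
        rw [if_neg hq, if_neg h2, if_pos h3]
        have hbuild : pvBuildA scs ((1 : Nat) : Int) =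
            scs.foldl (fun d sc => d.insert (sc.take 1) (d.getD (sc.take 1) 0 + 1))
              PySem.Dict.empty := by
          rw [pvBuildA_eq_insertfold, List.foldl_map]
          simp only [PySem.List.slice_to_natCast]
        rw [hbuild]

-- ===== VERDICT (by name: the statement is the Claim_ definition above) =====
theorem absence_counter_spec : Claim_equal_absence_counter := by
  intro scs _
  exact main_eq scs
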